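-- pv_equiv track=rewrite | github.com/DanielZastrau/ProjectEuler | Python/SCRIPTS/Problem54_Poker.py | count
-- ===== SOURCE A (Python) =====
-- def count(player):
--     d = dict()
--     for elem in [ elem[0] for elem in player ]:
--         if elem in d.keys():
--             d[elem] += 1
--         else:
--             d[elem] = 1
--     return d
-- ===== SOURCE B (Python) =====
-- def count(player):
--     firsts = [e[0] for e in player]
--     return {k: firsts.count(k) for k in dict.fromkeys(firsts)}
-- ===== Notes on version B (the rewrite author's own statement) =====
-- stated objective: simpler
-- what changed: Replaces A's incremental dict built by a membership-test-and-update loop with a dict comprehension: dedup the first elements with dict.fromkeys (first-occurrence order) and count each key once with list.count.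
import Mathlib
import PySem

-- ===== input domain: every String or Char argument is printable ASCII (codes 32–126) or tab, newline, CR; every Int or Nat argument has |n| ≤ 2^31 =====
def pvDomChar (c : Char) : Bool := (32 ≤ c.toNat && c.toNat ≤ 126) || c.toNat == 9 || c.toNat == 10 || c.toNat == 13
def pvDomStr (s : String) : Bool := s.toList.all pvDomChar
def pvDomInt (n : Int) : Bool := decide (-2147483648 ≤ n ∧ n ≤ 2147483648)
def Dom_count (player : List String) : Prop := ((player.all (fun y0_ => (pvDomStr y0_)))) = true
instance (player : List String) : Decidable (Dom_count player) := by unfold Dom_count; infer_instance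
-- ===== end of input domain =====

-- B replaces A's incremental counting loop by dedup-then-count-each-key (simpler, same values).

-- e[0] as a one-character Python string; total via pyGetD — used ONLY under Pre_count (no empty string),
-- where Python's e[0] returns normally.
def pvFirst (s : String) : String := String.ofList [PySem.List.pyGetD s.toList 0 ' ']

-- ===== PORT A =====
def count (player : List String) : List (String × Int) :=
  ((player.map (fun e => pvFirst e)).foldl
    (fun d elem =>
      if d.contains elem then d.insert elem (d.getD elem 0 + 1)
      else d.insert elem 1)
    PySem.Dict.empty).items

-- ===== PORT B =====
def count_alt (player : List String) : List (String × Int) :=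
  let firsts := player.map (fun e => pvFirst e)
  (PySem.List.dedup firsts).map (fun k => (k, (firsts.count k : Int)))

-- ===== PRECONDITION & SPEC =====
-- Pre_ excludes inputs containing an empty string, on which A's e[0] raises IndexError.
def Pre_count (player : List String) : Prop := ∀ s ∈ player, s ≠ ""
instance (player : List String) : Decidable (Pre_count player) := by unfold Pre_count; infer_instance

def pvWitness_count : List String := ["AH", "AD", "2C"]

def Spec_count (player : List String) (out : List (String × Int)) : Prop := out = count_alt player
instance (player : List String) (out : List (String × Int)) : Decidable (Spec_count player out) := by unfold Spec_count; infer_instance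

-- ===== CLAIM (what is proved, stated in full; the proofs are below) =====
def Claim_equal_count : Prop := ∀ (player : List String), Dom_count player → Pre_count player → Spec_count player (count player)

-- ===== LEMMAS AND PROOFS =====

-- A's two branches are one and the same insert: on the missing-key branch the default lookup is 0.
theorem count_step_eq (d : PySem.Dict String Int) (e : String) :
    (if d.contains e then d.insert e (d.getD e 0 + 1) else d.insert e 1)
      = d.insert e (d.getD e 0 + 1) := by
  by_cases h : d.contains e = true
  · simp [h]
  · have hf : d.contains e = false := by simpa using h
    have h2 : d.get? e = none := by
      rw [PySem.Dict.get?_eq_none_iff_contains]; exact hf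
    simp [hf, PySem.Dict.getD, h2]

-- ===== VERDICT (by name: the statement is the Claim_ definition above) =====
theorem count_spec : Claim_equal_count := by
  intro player _ _
  unfold Spec_count count count_alt
  have hstep :
      (fun (d : PySem.Dict String Int) (elem : String) =>
          if d.contains elem then d.insert elem (d.getD elem 0 + 1)
          else d.insert elem 1)
        = fun d elem => d.insert elem (d.getD elem 0 + 1) := by
    funext d e; exact count_step_eq d e
  rw [hstep, PySem.Dict.foldl_insert_getD_add_one_eq_counter,
      PySem.Dict.items_counter]
  simp [PySem.List.dedup_eq_ofList]
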